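-- pv_equiv track=rewrite | github.com/chiubacca94/interview | cosmo/consecutive.py | solution
-- ===== SOURCE A (Python) =====
-- def solution(n):
--     # TODO: implement
--     ans = 0
--
--     while n > 0:
--         last_digit = n % 10
--         n //= 10
--
--         digit = n % 10
--         if digit == last_digit:
--             ans += 1
--
--
--     return ans
-- ===== SOURCE B (Python) =====
-- def solution(n):
--     # A two-digit window 10*a + b (0 <= a,b <= 9) has equal digits iff it is divisible by 11.
--     # Slide a power-of-ten window over the (unmutated) n and count divisible-by-11 windows.
--     ans, p = 0, 1
--     while n // p >= 10:
--         if n // p % 100 % 11 == 0: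
--             ans += 1
--         p *= 10
--     return ans
-- ===== Notes on version B (the rewrite author's own statement) =====
-- stated objective: alternative
-- what changed: B never compares digits: it slides a power-of-ten window over the unmutated n and counts two-digit windows n//p%100 divisible by 11 (a two-digit number has equal digits iff it is a multiple of 11), whereas A destructively shifts n digit by digit and compares each extracted digit with the previous one.
import Mathlib
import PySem

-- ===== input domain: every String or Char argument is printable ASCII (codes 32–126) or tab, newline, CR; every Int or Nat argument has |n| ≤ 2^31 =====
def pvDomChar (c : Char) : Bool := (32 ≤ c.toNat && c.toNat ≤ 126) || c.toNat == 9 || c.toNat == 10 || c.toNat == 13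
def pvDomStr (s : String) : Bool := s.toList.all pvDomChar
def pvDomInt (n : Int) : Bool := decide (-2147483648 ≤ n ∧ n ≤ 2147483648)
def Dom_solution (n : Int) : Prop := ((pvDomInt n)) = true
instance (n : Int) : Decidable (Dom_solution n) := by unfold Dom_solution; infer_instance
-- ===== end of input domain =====

-- B replaces A's digit-extraction-and-compare loop (which mutates n) by a sliding power-of-ten
-- window over the unmutated n, counting two-digit windows divisible by 11 (alternative, same cost).


-- ===== PORT A =====
-- A's while loop: state (n, ans); n is shifted right by one digit each pass
def solutionLoop (n ans : Int) : Int :=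
  if h : 0 < n then
    let last_digit := PySem.Int.mod n 10
    let n' := PySem.Int.floordiv n 10
    let digit := PySem.Int.mod n' 10
    solutionLoop n' (if digit = last_digit then ans + 1 else ans)
  else ans
termination_by n.toNat
decreasing_by
  simp only [PySem.Int.floordiv_eq_ediv_of_pos (by norm_num : (0:Int) < 10)]
  omega

def solution (n : Int) : Int := solutionLoop n 0

-- ===== PORT B =====
-- B's while loop: state (p, ans); n is never changed, the window power p grows.
-- The '0 < p' conjunct is a totality guard only (Python B always has p ≥ 1; it starts at 1
-- and is only multiplied by 10), needed so the recursion is well-founded for all Int arguments.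
def altLoop (n p ans : Int) : Int :=
  if h : 0 < p ∧ 10 ≤ PySem.Int.floordiv n p then
    altLoop n (p * 10)
      (if PySem.Int.mod (PySem.Int.mod (PySem.Int.floordiv n p) 100) 11 = 0 then ans + 1 else ans)
  else ans
termination_by (n / p).toNat
decreasing_by
  obtain ⟨hp, hge⟩ := h
  rw [PySem.Int.floordiv_eq_ediv_of_pos hp] at hge
  have h10 : n / (p * 10) = n / p / 10 := by
    rw [Int.ediv_ediv_of_nonneg (le_of_lt hp)]
  rw [h10]
  omega

def solution_alt (n : Int) : Int := altLoop n 1 0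

-- ===== PRECONDITION & SPEC =====
def Spec_solution (n : Int) (out : Int) : Prop := out = solution_alt n
instance (n : Int) (out : Int) : Decidable (Spec_solution n out) := by unfold Spec_solution; infer_instance

-- ===== CLAIM (what is proved, stated in full; the proofs are below) =====
def Claim_equal_solution : Prop := ∀ (n : Int), Dom_solution n → Spec_solution n (solution n)

-- ===== LEMMAS AND PROOFS =====

-- common reference function: number of i ≥ 0 with n / 10^i ≥ 10 and (n / 10^i) % 100 ≡ 0 (mod 11)
def G (n : Int) : Int :=
  if h : 10 ≤ n then (if n % 100 % 11 = 0 then 1 else 0) + G (n / 10) else 0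
termination_by n.toNat
decreasing_by omega

theorem solutionLoop_eq (n ans : Int) : solutionLoop n ans = ans + G n := by
  by_cases h : 0 < n
  · rw [solutionLoop, dif_pos h]
    simp only [PySem.Int.floordiv_eq_ediv_of_pos (by norm_num : (0:Int) < 10),
      PySem.Int.mod_eq_emod_of_pos (by norm_num : (0:Int) < 10)]
    rw [solutionLoop_eq (n / 10)]
    by_cases h10 : 10 ≤ n
    · conv_rhs => rw [G]
      rw [dif_pos h10]
      have h1 : n % 100 = 10 * (n / 10 % 10) + n % 10 := by omega
      have heq : (n / 10 % 10 = n % 10) ↔ (n % 100 % 11 = 0) := by omega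
      by_cases hc : n / 10 % 10 = n % 10
      · rw [if_pos hc, if_pos (heq.mp hc)]; ring
      · rw [if_neg hc, if_neg (fun hz => hc (heq.mpr hz))]
        ring
    · have hz : n / 10 = 0 := by omega
      have hc : ¬ (n / 10 % 10 = n % 10) := by omega
      rw [if_neg hc, hz, G, dif_neg (by norm_num), G, dif_neg h10]
  · rw [solutionLoop, dif_neg h, G, dif_neg (by omega : ¬ (10:Int) ≤ n)]
    ring
termination_by n.toNat
decreasing_by omega

theorem altLoop_eq (n p ans : Int) (hp : 0 < p) : altLoop n p ans = ans + G (n / p) := by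
  by_cases h : 10 ≤ PySem.Int.floordiv n p
  · rw [altLoop, dif_pos ⟨hp, h⟩]
    rw [PySem.Int.floordiv_eq_ediv_of_pos hp] at h ⊢
    simp only [PySem.Int.mod_eq_emod_of_pos (by norm_num : (0:Int) < 100),
      PySem.Int.mod_eq_emod_of_pos (by norm_num : (0:Int) < 11)]
    rw [altLoop_eq n (p * 10) _ (by positivity)]
    have h10 : n / (p * 10) = n / p / 10 := by
      rw [Int.ediv_ediv_of_nonneg (le_of_lt hp)]
    rw [h10]
    conv_rhs => rw [G, dif_pos h]
    split_ifs <;> ring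
  · rw [altLoop, dif_neg (by tauto)]
    rw [PySem.Int.floordiv_eq_ediv_of_pos hp] at h
    rw [G, dif_neg h]
    ring
termination_by (n / p).toNat
decreasing_by
  rw [PySem.Int.floordiv_eq_ediv_of_pos hp] at h
  have h10 : n / (p * 10) = n / p / 10 := by
    rw [Int.ediv_ediv_of_nonneg (le_of_lt hp)]
  rw [h10]
  omega

-- ===== VERDICT (by name: the statement is the Claim_ definition above) =====
theorem solution_spec : Claim_equal_solution := by
  intro n _
  unfold Spec_solution solution solution_alt
  rw [solutionLoop_eq, altLoop_eq n 1 0 (by norm_num), Int.ediv_one]
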